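-- pv_equiv track=rewrite | github.com/sasakama-code/sphinxcontrib-jsontable | sphinxcontrib/jsontable/excel_data_loader.py | _detect_column_range
-- ===== SOURCE A (Python) =====
-- def _detect_column_range(
--     data: list[list[str]], start_row: int, end_row: int
-- ) -> tuple[int, int]:
--     """指定された行範囲内での列範囲を検出。
--
--     Args:
--         data: Excelデータ
--         start_row: 開始行
--         end_row: 終了行
--
--     Returns:
--         tuple: (min_col, max_col)
--     """
--     if not data or start_row > end_row:
--         return 0, 0
--
--     max_cols = max(len(row) for row in data[start_row : end_row + 1])
--
--     # 左端の検出
--     min_col = max_cols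
--     for row_idx in range(start_row, end_row + 1):
--         row = data[row_idx]
--         for col_idx, cell in enumerate(row):
--             if str(cell).strip():
--                 min_col = min(min_col, col_idx)
--                 break
--
--     # 右端の検出
--     max_col = 0
--     for row_idx in range(start_row, end_row + 1):
--         row = data[row_idx]
--         for col_idx in range(len(row) - 1, -1, -1):
--             if str(row[col_idx]).strip():
--                 max_col = max(max_col, col_idx)
--                 break
--
--     return min_col if min_col < max_cols else 0, max_col
-- ===== SOURCE B (Python) =====
-- def _detect_column_range(
--     data: list[list[str]], start_row: int, end_row: int
-- ) -> tuple[int, int]: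
--     """Detect the min/max non-empty column within the row range."""
--     if not data or start_row > end_row:
--         return 0, 0
--     cols = [
--         col_idx
--         for row_idx in range(start_row, end_row + 1)
--         for col_idx, cell in enumerate(data[row_idx])
--         if str(cell).strip()
--     ]
--     if not cols:
--         return 0, 0
--     return min(cols), max(cols)
-- ===== Notes on version B (the rewrite author's own statement) =====
-- stated objective: simpler
-- what changed: A makes two directional scans with early breaks (a left-to-right pass keeping a running min of each row's first occupied column, then a right-to-left pass keeping a running max of each row's last occupied column) plus a clamp of min_col against max_cols; B makes one gather pass collecting every occupied column index into a list and returns (min(cols), max(cols)), or (0, 0) when the list is empty. …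
-- outside the precondition, e.g. on _detect_column_range([['', '\t', 'ab', ' '], []], -1, 1): A returns (0, 2), B returns (2, 2)
import Mathlib
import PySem

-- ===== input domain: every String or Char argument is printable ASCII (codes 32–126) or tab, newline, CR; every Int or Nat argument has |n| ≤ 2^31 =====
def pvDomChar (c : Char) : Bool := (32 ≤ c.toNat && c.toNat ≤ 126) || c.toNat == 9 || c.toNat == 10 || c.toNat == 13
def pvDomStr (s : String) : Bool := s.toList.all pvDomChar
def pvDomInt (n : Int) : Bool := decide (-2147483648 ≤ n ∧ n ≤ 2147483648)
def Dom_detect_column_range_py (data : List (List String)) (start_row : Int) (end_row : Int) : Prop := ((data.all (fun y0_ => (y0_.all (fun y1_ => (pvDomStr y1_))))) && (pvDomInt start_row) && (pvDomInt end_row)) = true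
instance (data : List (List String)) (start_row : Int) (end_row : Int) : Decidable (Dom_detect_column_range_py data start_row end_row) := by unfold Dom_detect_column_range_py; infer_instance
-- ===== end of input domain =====

-- B replaces A's two directional early-break scans (and the min_col-vs-max_cols clamp) by one
-- gather pass that collects every occupied column index and takes min/max; objective: simpler.

-- ===== PORT A =====

-- bool(str(cell).strip()) — cell is already a str
def pvTruthy (s : String) : Bool := !(PySem.Str.strip s == "")

-- inner loop of the left scan: 'for col_idx, cell in enumerate(row): if truthy: … break'
-- = index of the first truthy cell (counter i carries the enumerate index)
def pvFirstNB : List String → Int → Option Int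
  | [], _ => none
  | c :: r, i => if pvTruthy c then some i else pvFirstNB r (i + 1)

-- inner loop of the right scan: 'for col_idx in range(len(row)-1, -1, -1): if truthy: … break'
-- = index of the last truthy cell (right-to-left preference)
def pvLastNB : List String → Int → Option Int
  | [], _ => none
  | c :: r, i =>
    match pvLastNB r (i + 1) with
    | some j => some j
    | none => if pvTruthy c then some i else none

def detect_column_range_py (data : List (List String)) (start_row : Int) (end_row : Int) : Int × Int :=
  if data = [] ∨ start_row > end_row then (0, 0)
  else
    -- max(len(row) for row in data[start_row:end_row+1]); Python raises ValueError on an empty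
    -- slice — excluded by Pre_ — so the .getD 0 default is never the returned value under Pre_
    let max_cols : Int :=
      (((PySem.List.slice data (some start_row) (some (end_row + 1))).map
          (fun r => (r.length : Int))).max?).getD 0
    -- data[row_idx]: pyGetD is exact under Pre_ (row_idx in range); Python raises IndexError
    -- outside, which Pre_ excludes
    let min_col : Int :=
      (PySem.List.pyRange start_row (end_row + 1) 1).foldl
        (fun mc i => (pvFirstNB (PySem.List.pyGetD data i []) 0).elim mc (fun c => min mc c))
        max_cols
    let max_col : Int :=
      (PySem.List.pyRange start_row (end_row + 1) 1).foldl
        (fun mx i => (pvLastNB (PySem.List.pyGetD data i []) 0).elim mx (fun c => max mx c))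
        0
    (if min_col < max_cols then min_col else 0, max_col)

-- ===== PORT B =====

-- the comprehension's inner part: indices of the truthy cells of one row
def pvRowCols : List String → Int → List Int
  | [], _ => []
  | c :: r, i => if pvTruthy c then i :: pvRowCols r (i + 1) else pvRowCols r (i + 1)

def detect_column_range_py_alt (data : List (List String)) (start_row : Int) (end_row : Int) : Int × Int :=
  if data = [] ∨ start_row > end_row then (0, 0)
  else
    let cols : List Int :=
      (PySem.List.pyRange start_row (end_row + 1) 1).flatMap
        (fun i => pvRowCols (PySem.List.pyGetD data i []) 0)
    match cols.min?, cols.max? with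
    | some a, some b => (a, b)
    | _, _ => (0, 0)

-- ===== PRECONDITION & SPEC =====
-- Pre_ excludes out-of-range row indices where A raises (ValueError from max() on an empty slice,
-- IndexError from data[row_idx]) and negative row indices, on which Python's wraparound makes the
-- max_cols slice and the indexed loop visit different rows, so A's clamp of min_col against
-- max_cols yields an accidental value.
def Pre_detect_column_range_py (data : List (List String)) (start_row : Int) (end_row : Int) : Prop :=
  data = [] ∨ start_row > end_row ∨ (0 ≤ start_row ∧ end_row < (data.length : Int))
instance (data : List (List String)) (start_row : Int) (end_row : Int) : Decidable (Pre_detect_column_range_py data start_row end_row) := by unfold Pre_detect_column_range_py; infer_instance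

def pvWitness_detect_column_range_py : List (List String) × Int × Int := ([["", "x"], ["y"]], 0, 1)

def Spec_detect_column_range_py (data : List (List String)) (start_row : Int) (end_row : Int) (out : Int × Int) : Prop := out = detect_column_range_py_alt data start_row end_row
instance (data : List (List String)) (start_row : Int) (end_row : Int) (out : Int × Int) : Decidable (Spec_detect_column_range_py data start_row end_row out) := by unfold Spec_detect_column_range_py; infer_instance

-- ===== CLAIM (what is proved, stated in full; the proofs are below) =====
def Claim_equal_detect_column_range_py : Prop := ∀ (data : List (List String)) (start_row : Int) (end_row : Int), Dom_detect_column_range_py data start_row end_row → Pre_detect_column_range_py data start_row end_row → Spec_detect_column_range_py data start_row end_row (detect_column_range_py data start_row end_row)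

-- ===== LEMMAS AND PROOFS =====

-- every index produced by pvRowCols row i lies in [i, i + row.length)
theorem pvRowCols_mem_bounds (row : List String) (i j : Int) (h : j ∈ pvRowCols row i) :
    i ≤ j ∧ j < i + (row.length : Int) := by
  induction row generalizing i with
  | nil => simp [pvRowCols] at h
  | cons c r ih =>
    simp only [pvRowCols] at h
    by_cases hc : pvTruthy c
    · simp [hc] at h
      rcases h with rfl | h
      · simp only [List.length_cons]; omega
      · have := ih (i + 1) h
        simp [List.length_cons]; omega
    · simp [hc] at h
      have := ih (i + 1) h
      simp [List.length_cons]; omega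

-- the first truthy index is the minimum of the gathered indices
theorem pvFirstNB_eq_min? (row : List String) (i : Int) :
    pvFirstNB row i = (pvRowCols row i).min? := by
  induction row generalizing i with
  | nil => rfl
  | cons c r ih =>
    simp only [pvFirstNB, pvRowCols]
    by_cases hc : pvTruthy c
    · simp only [hc, if_pos, List.min?_cons]
      cases hm : (pvRowCols r (i + 1)).min? with
      | none => simp
      | some m =>
        have hmem := List.min?_mem hm
        have := (pvRowCols_mem_bounds r (i + 1) m hmem).1
        simp [min_def]; omega
    · simp [hc, ih]

-- the last truthy index (right-to-left scan) is the maximum of the gathered indices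
theorem pvLastNB_eq_max? (row : List String) (i : Int) :
    pvLastNB row i = (pvRowCols row i).max? := by
  induction row generalizing i with
  | nil => rfl
  | cons c r ih =>
    simp only [pvLastNB, pvRowCols, ih]
    by_cases hc : pvTruthy c
    · simp only [hc, if_pos, List.max?_cons]
      cases hm : (pvRowCols r (i + 1)).max? with
      | none => simp
      | some m =>
        have hmem := List.max?_mem hm
        have := (pvRowCols_mem_bounds r (i + 1) m hmem).1
        simp [max_def]; omega
    · cases hm : (pvRowCols r (i + 1)).max? with
      | none => simp [hc, hm]
      | some m => simp [hc, hm]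

-- 'fold one optional min into the accumulator' = 'foldl min'
theorem pvElimMin_eq_foldl (l : List Int) (a : Int) :
    l.min?.elim a (fun m => min a m) = l.foldl min a := by
  induction l generalizing a with
  | nil => rfl
  | cons x xs ih =>
    rw [List.min?_cons]
    cases hm : xs.min? with
    | none =>
      have : xs = [] := List.min?_eq_none_iff.mp hm
      subst this; simp
    | some m =>
      simp only [Option.elim]
      rw [List.foldl_cons, ← ih (min a x), hm]
      simp [Option.elim, min_assoc]

theorem pvElimMax_eq_foldl (l : List Int) (a : Int) :
    l.max?.elim a (fun m => max a m) = l.foldl max a := by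
  induction l generalizing a with
  | nil => rfl
  | cons x xs ih =>
    rw [List.max?_cons]
    cases hm : xs.max? with
    | none =>
      have : xs = [] := List.max?_eq_none_iff.mp hm
      subst this; simp
    | some m =>
      simp only [Option.elim]
      rw [List.foldl_cons, ← ih (max a x), hm]
      simp [Option.elim, max_assoc]

theorem pvFoldl_flatMap {α β : Type} (R : List α) (f : α → List β) (g : β → β → β) (a : β)
    (step : β → α → β) (hstep : ∀ acc r, step acc r = (f r).foldl g acc) :
    R.foldl step a = (R.flatMap f).foldl g a := by
  induction R generalizing a with
  | nil => rfl
  | cons r R ih =>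
    rw [List.foldl_cons, List.flatMap_cons, List.foldl_append, hstep, ih]

-- the rows the loop visits (as a map of pyGetD over the range) are exactly the slice
theorem pvSliceEq (xs : List (List String)) (a b : Nat) (hb : b ≤ xs.length) :
    PySem.List.slice xs (some (a : Int)) (some (b : Int))
      = (PySem.List.pyRange (a : Int) (b : Int) 1).map (fun j => PySem.List.pyGetD xs j []) := by
  rw [PySem.List.slice_natCast, PySem.List.pyRange_one]
  have hba : ((b : Int) - (a : Int)).toNat = b - a := by omega
  rw [hba, List.map_map]
  apply List.ext_getElem
  · simp; omega
  · intro i h1 h2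
    have hia : a + i < xs.length := by simp at h2; omega
    simp only [List.getElem_take, List.getElem_drop, List.getElem_map, List.getElem_range,
      Function.comp_apply]
    have : (a : Int) + (i : Int) = ((a + i : Nat) : Int) := by push_cast; ring
    rw [this, PySem.List.pyGetD_natCast, List.getD_eq_getElem]

-- each row's length is bounded by the running max of lengths
theorem pvLen_le_max (R : List (List String)) (row : List String) (h : row ∈ R) :
    (row.length : Int) ≤ ((R.map (fun r => (r.length : Int))).max?).getD 0 := by
  have hmem : ((row.length : Int)) ∈ R.map (fun r => (r.length : Int)) :=
    List.mem_map_of_mem h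
  cases hm : (R.map (fun r => (r.length : Int))).max? with
  | none =>
    rw [List.max?_eq_none_iff] at hm
    rw [hm] at hmem; simp at hmem
  | some m =>
    rw [List.max?_eq_some_iff] at hm
    simpa using hm.2 _ hmem

-- core: A's two clamped directional folds over a row list R agree with B's gather-then-min/max
theorem pvKey (R : List (List String)) :
    (let max_cols : Int := ((R.map (fun r => (r.length : Int))).max?).getD 0
     let min_col : Int :=
       R.foldl (fun mc row => (pvFirstNB row 0).elim mc (fun c => min mc c)) max_cols
     let max_col : Int :=
       R.foldl (fun mx row => (pvLastNB row 0).elim mx (fun c => max mx c)) 0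
     ((if min_col < max_cols then min_col else 0, max_col) : Int × Int))
    = (let cols := R.flatMap (fun row => pvRowCols row 0)
       match cols.min?, cols.max? with
       | some a, some b => (a, b)
       | _, _ => ((0, 0) : Int × Int)) := by
  simp only []
  set M : Int := ((R.map (fun r => (r.length : Int))).max?).getD 0 with hM
  set cols : List Int := R.flatMap (fun row => pvRowCols row 0) with hcols
  have hmin : R.foldl (fun mc row => (pvFirstNB row 0).elim mc (fun c => min mc c)) M
      = cols.min?.elim M (fun m => min M m) := by
    rw [pvFoldl_flatMap R (fun row => pvRowCols row 0) min M _
        (fun acc row => by rw [pvFirstNB_eq_min?, pvElimMin_eq_foldl]),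
      ← pvElimMin_eq_foldl]
  have hmax : R.foldl (fun mx row => (pvLastNB row 0).elim mx (fun c => max mx c)) 0
      = cols.max?.elim 0 (fun m => max 0 m) := by
    rw [pvFoldl_flatMap R (fun row => pvRowCols row 0) max 0 _
        (fun acc row => by rw [pvLastNB_eq_max?, pvElimMax_eq_foldl]),
      ← pvElimMax_eq_foldl]
  have colmem : ∀ j ∈ cols, 0 ≤ j ∧ j < M := by
    intro j hj
    rw [hcols, List.mem_flatMap] at hj
    obtain ⟨row, hrow, hjrow⟩ := hj
    have hb := pvRowCols_mem_bounds row 0 j hjrow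
    have hl := pvLen_le_max R row hrow
    rw [← hM] at hl
    omega
  rw [hmin, hmax]
  cases hmn : cols.min? with
  | none =>
    have hnil : cols = [] := List.min?_eq_none_iff.mp hmn
    rw [hnil]
    simp
  | some m =>
    have hmem := List.min?_mem hmn
    have hx : cols ≠ [] := by intro h; rw [h] at hmem; simp at hmem
    cases hmx : cols.max? with
    | none => exact absurd (List.max?_eq_none_iff.mp hmx) hx
    | some x =>
      have hxmem := List.max?_mem hmx
      have h1 := colmem m hmem
      have h2 := colmem x hxmem
      simp only [Option.elim]
      rw [min_eq_right (le_of_lt h1.2), max_eq_right h2.1, if_pos h1.2]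

-- ===== VERDICT (by name: the statement is the Claim_ definition above) =====
theorem detect_column_range_py_spec : Claim_equal_detect_column_range_py := by
  intro data s e _ hpre
  unfold Spec_detect_column_range_py
  by_cases hg : data = [] ∨ s > e
  · simp only [detect_column_range_py, detect_column_range_py_alt, if_pos hg]
  · push Not at hg
    obtain ⟨hd, hse⟩ := hg
    have hpre' : 0 ≤ s ∧ e < (data.length : Int) := by
      rcases hpre with h | h | h
      · exact absurd h hd
      · omega
      · exact h
    obtain ⟨hs0, hlen⟩ := hpre'
    obtain ⟨sn, rfl⟩ := Int.eq_ofNat_of_zero_le hs0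
    obtain ⟨en, rfl⟩ := Int.eq_ofNat_of_zero_le (le_trans hs0 hse)
    have hcond : ¬(data = [] ∨ (sn : Int) > (en : Int)) := by
      push Not; exact ⟨hd, hse⟩
    have he1 : ((en : Int) + 1) = ((en + 1 : Nat) : Int) := by push_cast; ring
    simp only [detect_column_range_py, detect_column_range_py_alt, if_neg hcond]
    rw [he1, pvSliceEq data sn (en + 1) (by omega)]
    rw [← List.foldl_map (f := fun j => PySem.List.pyGetD data j [])
        (g := fun mc row => (pvFirstNB row 0).elim mc (fun c => min mc c)),
      ← List.foldl_map (f := fun j => PySem.List.pyGetD data j [])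
        (g := fun mx row => (pvLastNB row 0).elim mx (fun c => max mx c)),
      ← List.flatMap_map (fun j => PySem.List.pyGetD data j []) (fun row => pvRowCols row 0)]
    exact pvKey ((PySem.List.pyRange (sn : Int) ((en + 1 : Nat) : Int) 1).map
      (fun j => PySem.List.pyGetD data j []))
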